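-- pv_equiv track=rewrite | github.com/SperanzaTY/spx-helper | mcp-tools/spark-query/spark_mcp_server.py | format_result_as_table
-- ===== SOURCE A (Python) =====
-- def format_result_as_table(columns: list, rows: list) -> str:
--     if not rows:
--         return "(0 rows)"
--
--     col_widths = {col: len(str(col)) for col in columns}
--     for row in rows:
--         for col in columns:
--             val = str(row.get(col, ""))
--             col_widths[col] = max(col_widths[col], min(len(val), 50))
--
--     header = " | ".join(str(col).ljust(col_widths[col]) for col in columns)
--     separator = "-|-".join("-" * col_widths[col] for col in columns)
--     lines = [header, separator]
--
--     for row in rows: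
--         values = []
--         for col in columns:
--             val = str(row.get(col, ""))
--             if len(val) > 50:
--                 val = val[:47] + "..."
--             values.append(val.ljust(col_widths[col]))
--         lines.append(" | ".join(values))
--
--     return "\n".join(lines)
-- ===== SOURCE B (Python) =====
-- def _cell(row, col):
--     v = str(row.get(col, ""))
--     return v[:47] + "..." if len(v) > 50 else v
--
--
-- def format_result_as_table(columns: list, rows: list) -> str:
--     if not rows:
--         return "(0 rows)"
--
--     def strip(col):
--         # one whole table column, rendered vertically: header, dashes, data cells
--         label = str(col)
--         body = [_cell(row, col) for row in rows]
--         w = len(label)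
--         for c in body:
--             w = max(w, len(c))
--         return [label.ljust(w), "-" * w] + [c.ljust(w) for c in body]
--
--     strips = [strip(c) for c in columns]
--     lines = []
--     for i in range(len(rows) + 2):
--         glue = "-|-" if i == 1 else " | "
--         lines.append(glue.join(s[i] for s in strips))
--     return "\n".join(lines)
-- ===== Notes on version B (the rewrite author's own statement) =====
-- stated objective: alternative
-- what changed: B is column-major: for each column it renders one complete vertical strip (padded header, dash segment, padded truncated data cells, with the width computed locally inside the strip), then assembles the table by transposing — an index loop over line numbers 0..len(rows)+1 that joins the i-th element of every strip — whereas A is row-major with a global width dict and a second row-by-row rendering pass.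
import Mathlib
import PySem

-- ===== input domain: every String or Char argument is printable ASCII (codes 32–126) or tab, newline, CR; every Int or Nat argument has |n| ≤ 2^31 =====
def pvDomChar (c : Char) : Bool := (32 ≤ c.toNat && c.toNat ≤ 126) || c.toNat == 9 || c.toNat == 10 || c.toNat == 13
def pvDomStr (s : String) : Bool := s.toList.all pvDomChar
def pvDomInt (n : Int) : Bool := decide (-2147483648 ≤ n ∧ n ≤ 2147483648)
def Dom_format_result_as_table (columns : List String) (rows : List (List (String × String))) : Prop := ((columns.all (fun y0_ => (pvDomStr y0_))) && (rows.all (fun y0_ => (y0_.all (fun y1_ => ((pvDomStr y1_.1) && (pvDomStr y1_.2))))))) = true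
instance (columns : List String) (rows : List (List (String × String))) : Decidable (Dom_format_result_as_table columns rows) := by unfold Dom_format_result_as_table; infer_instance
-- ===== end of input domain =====

-- B renders each table column as one complete vertical strip (padded header, dashes, padded data
-- cells, width computed locally) and assembles the table by transposing the strips with an index
-- loop over line numbers — a column-major alternative to A's row-major width-dict construction.


-- shared primitives (Python's row.get(col, "") and str.ljust)
def pvRowGet (row : List (String × String)) (c : String) : String :=
  (PySem.Dict.mk row).getD c ""

def pvLjust (cs : List Char) (w : Nat) : List Char :=
  cs ++ List.replicate (w - cs.length) ' '

-- ===== PORT A =====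
def format_result_as_table (columns : List String) (rows : List (List (String × String))) : String :=
  if rows = [] then "(0 rows)"
  else
    let d0 : PySem.Dict String Nat :=
      columns.foldl (fun d c => d.insert c c.toList.length) PySem.Dict.empty
    let cw : PySem.Dict String Nat :=
      rows.foldl (fun d row =>
        columns.foldl (fun d c =>
          let val := (pvRowGet row c).toList
          d.insert c (max (d.getD c 0) (min val.length 50))) d) d0
    let header := PySem.Chars.join " | ".toList
      (columns.map (fun c => pvLjust c.toList (cw.getD c 0)))
    let separator := PySem.Chars.join "-|-".toList
      (columns.map (fun c => List.replicate (cw.getD c 0) '-'))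
    let lines := rows.foldl (fun acc row =>
        let values := columns.foldl (fun vs c =>
          let val := (pvRowGet row c).toList
          let val := if val.length > 50 then PySem.List.slice val none (some 47) ++ "...".toList else val
          vs ++ [pvLjust val (cw.getD c 0)]) []
        acc ++ [PySem.Chars.join " | ".toList values]) [header, separator]
    String.ofList (PySem.Chars.join "\n".toList lines)

-- ===== PORT B =====
def pvCell (row : List (String × String)) (c : String) : List Char :=
  let s := (pvRowGet row c).toList
  if s.length > 50 then PySem.List.slice s none (some 47) ++ "...".toList else s

-- one whole table column, rendered vertically: header, dashes, data cells
def pvStrip (rows : List (List (String × String))) (c : String) : List (List Char) :=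
  let label := c.toList
  let body := rows.map (fun row => pvCell row c)
  let w := body.foldl (fun w s => max w s.length) label.length
  pvLjust label w :: List.replicate w '-' :: body.map (fun s => pvLjust s w)

def format_result_as_table_alt (columns : List String) (rows : List (List (String × String))) : String :=
  if rows = [] then "(0 rows)"
  else
    let strips := columns.map (pvStrip rows)
    -- Python's s[i] inside the loop: i always in range, ported as pyGetD with default []
    let lines := (PySem.List.pyRange 0 (rows.length + 2) 1).map (fun i =>
        let glue := if i = 1 then "-|-".toList else " | ".toList
        PySem.Chars.join glue (strips.map (fun s => PySem.List.pyGetD s i [])))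
    String.ofList (PySem.Chars.join "\n".toList lines)

-- ===== PRECONDITION & SPEC =====
def Spec_format_result_as_table (columns : List String) (rows : List (List (String × String))) (out : String) : Prop := out = format_result_as_table_alt columns rows
instance (columns : List String) (rows : List (List (String × String))) (out : String) : Decidable (Spec_format_result_as_table columns rows out) := by unfold Spec_format_result_as_table; infer_instance

-- ===== CLAIM (what is proved, stated in full; the proofs are below) =====
def Claim_equal_format_result_as_table : Prop := ∀ (columns : List String) (rows : List (List (String × String))), Dom_format_result_as_table columns rows → Spec_format_result_as_table columns rows (format_result_as_table columns rows)

-- ===== LEMMAS AND PROOFS =====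

-- the common closed form of one column's width
def pvW (rows : List (List (String × String))) (c : String) : Nat :=
  rows.foldl (fun w row => max w (min (pvRowGet row c).toList.length 50)) c.toList.length

theorem pv_getD_init (cs : List String) (f : String → Nat) (d : PySem.Dict String Nat) (x : String) :
    (cs.foldl (fun d c => d.insert c (f c)) d).getD x 0
      = if x ∈ cs then f x else d.getD x 0 := by
  induction cs generalizing d with
  | nil => simp
  | cons c cs ih =>
      simp only [List.foldl_cons, ih, PySem.Dict.getD_insert, List.mem_cons]
      by_cases hx : x ∈ cs <;> by_cases hc : x = c <;> simp [hx, hc]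

theorem pv_getD_inner (cs : List String) (m : String → Nat) (d : PySem.Dict String Nat) (x : String) :
    (cs.foldl (fun d c => d.insert c (max (d.getD c 0) (m c))) d).getD x 0
      = if x ∈ cs then max (d.getD x 0) (m x) else d.getD x 0 := by
  induction cs generalizing d with
  | nil => simp
  | cons c cs ih =>
      simp only [List.foldl_cons, ih, PySem.Dict.getD_insert, List.mem_cons]
      by_cases hx : x ∈ cs <;> by_cases hc : x = c <;> simp [hx, hc]

theorem pv_getD_outer (columns : List String) (rows : List (List (String × String)))
    (d : PySem.Dict String Nat) (x : String) :
    (rows.foldl (fun d row =>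
        columns.foldl (fun d c =>
          d.insert c (max (d.getD c 0) (min (pvRowGet row c).toList.length 50))) d) d).getD x 0
      = if x ∈ columns then
          rows.foldl (fun w row => max w (min (pvRowGet row x).toList.length 50)) (d.getD x 0)
        else d.getD x 0 := by
  induction rows generalizing d with
  | nil => simp
  | cons r rows ih =>
      simp only [List.foldl_cons, ih, pv_getD_inner]
      by_cases hx : x ∈ columns <;> simp [hx]

-- A's width dict agrees with pvW on every column name
theorem pv_cw_eq (columns : List String) (rows : List (List (String × String))) (x : String)
    (hx : x ∈ columns) :
    (rows.foldl (fun d row =>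
        columns.foldl (fun d c =>
          d.insert c (max (d.getD c 0) (min (pvRowGet row c).toList.length 50))) d)
      (columns.foldl (fun d c => d.insert c c.toList.length) PySem.Dict.empty)).getD x 0
      = pvW rows x := by
  rw [pv_getD_outer, pv_getD_init]
  simp [hx, pvW]

-- a formatted cell is exactly min(len, 50) characters long
theorem pv_cell_len (row : List (String × String)) (c : String) :
    (pvCell row c).length = min (pvRowGet row c).toList.length 50 := by
  unfold pvCell
  generalize (pvRowGet row c).toList = cs
  by_cases h : cs.length > 50 <;> simp [h, PySem.List.slice] <;> omega

-- the width computed locally inside a strip is pvW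
theorem pv_strip_w (rows : List (List (String × String))) (c : String) :
    (rows.map (fun row => pvCell row c)).foldl (fun w s => max w s.length) c.toList.length
      = pvW rows c := by
  rw [List.foldl_map]
  unfold pvW
  congr 1
  funext w row
  rw [pv_cell_len]

-- indexing into a strip's data cells (Python s[2+k] on a strip)
theorem pv_getD_two_add (x y : List Char) (zs : List (List Char)) (k : Nat) :
    PySem.List.pyGetD (x :: y :: zs) (2 + (k : Int)) [] = zs.getD k [] := by
  have : (2 + (k : Int)) = ((2 + k : Nat) : Int) := by push_cast; ring
  rw [this, PySem.List.pyGetD_natCast, Nat.add_comm]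
  simp [List.getD]

-- ===== VERDICT (by name: the statement is the Claim_ definition above) =====
theorem format_result_as_table_spec : Claim_equal_format_result_as_table := by
  intro columns rows _
  unfold Spec_format_result_as_table format_result_as_table format_result_as_table_alt
  by_cases hr : rows = []
  · simp [hr]
  · simp only [hr, if_false]
    refine congrArg String.ofList (congrArg _ ?_)
    rw [PySem.List.foldl_append_singleton_eq_map]
    -- unroll B's index loop: lines 0 and 1, then the data lines
    have hsplit : PySem.List.pyRange 0 ((rows.length : Int) + 2) 1
        = 0 :: 1 :: (List.range rows.length).map (fun k : Nat => 2 + (k : Int)) := by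
      rw [PySem.List.pyRange_one_cons (by omega), PySem.List.pyRange_one_cons (by omega),
        PySem.List.pyRange_one]
      norm_num
    rw [hsplit]
    simp only [List.map_cons, List.map_map, List.cons_append, List.nil_append, List.cons.injEq]
    refine ⟨?_, ?_, ?_⟩
    · -- header line
      simp only [pvStrip, Function.comp_def, PySem.List.pyGetD_zero_cons, if_neg (by norm_num : ¬ (0:Int) = 1)]
      refine congrArg _ (List.map_congr_left fun c hc => ?_)
      rw [pv_cw_eq columns rows c hc, ← pv_strip_w]
    · -- separator line
      have hget : ∀ (a b : List Char) (zs : List (List Char)),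
          PySem.List.pyGetD (a :: b :: zs) (1 : Int) [] = b := by
        intro a b zs
        rw [show (1:Int) = ((1:Nat) : Int) by norm_num, PySem.List.pyGetD_natCast]; rfl
      simp only [pvStrip, Function.comp_def, hget]
      refine congrArg _ (List.map_congr_left fun c hc => ?_)
      rw [pv_cw_eq columns rows c hc, ← pv_strip_w]
    · -- data lines
      refine List.ext_getElem (by simp) fun k hk1 hk2 => ?_
      simp only [List.getElem_map, List.getElem_range, Function.comp_def, pvStrip]
      simp only [pv_getD_two_add, if_neg (by intro h; omega : ¬ (2 + (k : Int)) = 1)]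
      have hk : k < rows.length := by simpa using hk1
      refine congrArg _ ?_
      rw [PySem.List.foldl_append_singleton_eq_map, List.nil_append]
      refine List.map_congr_left fun c hc => ?_
      rw [List.getD_eq_getElem _ _ (by simp [hk]), List.getElem_map, List.getElem_map,
        pv_cw_eq columns rows c hc, ← pv_strip_w]
      rfl
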